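-- pv_equiv track=rewrite | github.com/tyler-bit-ai/eSIMKeywordAnalysis | src/keyword_analysis/reporting.py | extract_korea_follow_on_modifier
-- ===== SOURCE A (Python) =====
-- def extract_korea_follow_on_modifier(keyword: str) -> str:
--     normalized = str(keyword).lower().strip()
--     for pattern in (
--         "korea esim",
--         "south korea esim",
--         "esim for korea",
--         "best esim for korea",
--         "best esim for south korea",
--     ):
--         if normalized == pattern:
--             return "root" if pattern in ("korea esim", "esim for korea", "south korea esim") else "best"
--         if normalized.startswith(pattern + " "):
--             return normalized.removeprefix(pattern).strip()
--     return "variant"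
-- ===== SOURCE B (Python) =====
-- _TABLE = {
--     "korea esim": "root",
--     "south korea esim": "root",
--     "esim for korea": "root",
--     "best esim for korea": "best",
--     "best esim for south korea": "best",
-- }
--
--
-- def extract_korea_follow_on_modifier(keyword: str) -> str:
--     n = str(keyword).lower().strip()
--     label = _TABLE.get(n)
--     if label is not None:
--         return label
--     for i, ch in enumerate(n):
--         if ch == " " and n[:i] in _TABLE:
--             return n[i + 1:].strip()
--     return "variant"
-- ===== Notes on version B (the rewrite author's own statement) =====
-- stated objective: alternative
-- what changed: Replaces A's per-pattern loop (an equality test plus a startswith/removeprefix pass for each of the five patterns) with a table-driven design: one dict lookup of the whole normalized string for exact matches, then a single left-to-right scan that returns the stripped tail after the first space whose preceding prefix is a key of the dict.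
import Mathlib
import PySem

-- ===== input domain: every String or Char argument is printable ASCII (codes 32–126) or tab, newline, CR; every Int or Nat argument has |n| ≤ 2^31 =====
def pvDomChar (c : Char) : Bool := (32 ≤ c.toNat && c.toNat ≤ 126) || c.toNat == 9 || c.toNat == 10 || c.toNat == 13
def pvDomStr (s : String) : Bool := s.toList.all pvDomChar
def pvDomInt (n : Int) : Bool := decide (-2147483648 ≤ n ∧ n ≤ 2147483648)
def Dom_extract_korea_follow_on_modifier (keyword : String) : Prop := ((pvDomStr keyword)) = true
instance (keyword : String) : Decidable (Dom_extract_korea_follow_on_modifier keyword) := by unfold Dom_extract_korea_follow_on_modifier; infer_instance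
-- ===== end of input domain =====

-- B replaces A's per-pattern loop (equality test + startswith/removeprefix per pattern) by a
-- dict of the five patterns and a single left-to-right scan for the first space whose prefix is
-- a key of the dict (objective: alternative decomposition, same exact return value).

-- ===== PORT A =====
-- A's tuple of patterns, as explicit character lists
def pvKE : List Char := ['k','o','r','e','a',' ','e','s','i','m']
def pvSKE : List Char := ['s','o','u','t','h',' ','k','o','r','e','a',' ','e','s','i','m']
def pvEFK : List Char := ['e','s','i','m',' ','f','o','r',' ','k','o','r','e','a']
def pvBEFK : List Char := ['b','e','s','t',' ','e','s','i','m',' ','f','o','r',' ','k','o','r','e','a']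
def pvBEFSK : List Char := ['b','e','s','t',' ','e','s','i','m',' ','f','o','r',' ','s','o','u','t','h',' ','k','o','r','e','a']

-- normalized.removeprefix(pattern)
def pvRemoveprefix (s p : List Char) : List Char :=
  if PySem.Chars.startswith s p then s.drop p.length else s

-- the 'for pattern in (...)' loop of A, with early returns
def pvALoop (n : List Char) : List (List Char) → List Char
  | [] => ['v','a','r','i','a','n','t']
  | p :: ps =>
    if n = p then
      if p = pvKE ∨ p = pvEFK ∨ p = pvSKE then ['r','o','o','t'] else ['b','e','s','t']
    else if PySem.Chars.startswith n (p ++ [' ']) then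
      PySem.Chars.strip (pvRemoveprefix n p)
    else pvALoop n ps

def extract_korea_follow_on_modifier (keyword : String) : String :=
  String.ofList (pvALoop (PySem.Chars.strip (PySem.Chars.lower keyword.toList))
    [pvKE, pvSKE, pvEFK, pvBEFK, pvBEFSK])

-- ===== PORT B =====
-- _TABLE of Source B (a dict literal, insertion order)
def pvTable : PySem.Dict (List Char) String :=
  PySem.Dict.mk [("korea esim".toList, "root"), ("south korea esim".toList, "root"),
    ("esim for korea".toList, "root"), ("best esim for korea".toList, "best"),
    ("best esim for south korea".toList, "best")]

-- the 'for i, ch in enumerate(n)' scan of Source B: first space whose prefix n[:i] is a table key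
def pvBScan (full : List Char) : Nat → List Char → Option String
  | _, [] => none
  | i, c :: rest =>
    if c = ' ' ∧ (pvTable.get? (full.take i)).isSome then
      some (String.ofList (PySem.Chars.strip (full.drop (i + 1))))
    else
      pvBScan full (i + 1) rest

def pvBBody (n : List Char) : String :=
  match pvTable.get? n with
  | some label => label
  | none =>
    match pvBScan n 0 n with
    | some r => r
    | none => "variant"

def extract_korea_follow_on_modifier_alt (keyword : String) : String :=
  pvBBody (PySem.Chars.strip (PySem.Chars.lower keyword.toList))

-- ===== PRECONDITION & SPEC =====
def Spec_extract_korea_follow_on_modifier (keyword : String) (out : String) : Prop := out = extract_korea_follow_on_modifier_alt keyword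
instance (keyword : String) (out : String) : Decidable (Spec_extract_korea_follow_on_modifier keyword out) := by unfold Spec_extract_korea_follow_on_modifier; infer_instance

-- ===== CLAIM (what is proved, stated in full; the proofs are below) =====
def Claim_equal_extract_korea_follow_on_modifier : Prop := ∀ (keyword : String), Dom_extract_korea_follow_on_modifier keyword → Spec_extract_korea_follow_on_modifier keyword (extract_korea_follow_on_modifier keyword)

-- ===== LEMMAS AND PROOFS =====

theorem pv_strip_space_cons (t : List Char) :
    PySem.Chars.strip (' ' :: t) = PySem.Chars.strip t := by
  simp [PySem.Chars.strip, PySem.Chars.lstrip,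
    show PySem.Chars.isspace ' ' = true from rfl]

theorem pv_table_some {k : List Char} (h : (pvTable.get? k).isSome) :
    k = pvKE ∨ k = pvSKE ∨ k = pvEFK ∨ k = pvBEFK ∨ k = pvBEFSK := by
  simp only [pvTable, PySem.Dict.get?_mk_cons] at h
  split at h
  · exact Or.inl (beq_iff_eq.mp (by assumption)).symm
  split at h
  · exact Or.inr (Or.inl (beq_iff_eq.mp (by assumption)).symm)
  split at h
  · exact Or.inr (Or.inr (Or.inl (beq_iff_eq.mp (by assumption)).symm))
  split at h
  · exact Or.inr (Or.inr (Or.inr (Or.inl (beq_iff_eq.mp (by assumption)).symm)))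
  split at h
  · exact Or.inr (Or.inr (Or.inr (Or.inr (beq_iff_eq.mp (by assumption)).symm)))
  · simp [PySem.Dict.get?] at h

theorem pv_table_none {k : List Char} (h1 : k ≠ pvKE) (h2 : k ≠ pvSKE) (h3 : k ≠ pvEFK)
    (h4 : k ≠ pvBEFK) (h5 : k ≠ pvBEFSK) : pvTable.get? k = none := by
  simp only [pvTable, PySem.Dict.get?]
  norm_num
  exact ⟨fun h => h1 h.symm, fun h => h2 h.symm, fun h => h3 h.symm,
    fun h => h4 h.symm, fun h => h5 h.symm⟩

theorem pv_scan_none (full : List Char)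
    (hke : ¬ (pvKE ++ [' ']) <+: full) (hske : ¬ (pvSKE ++ [' ']) <+: full)
    (hefk : ¬ (pvEFK ++ [' ']) <+: full) (hbefk : ¬ (pvBEFK ++ [' ']) <+: full)
    (hbefsk : ¬ (pvBEFSK ++ [' ']) <+: full) :
    ∀ (rest : List Char) (i : Nat), rest = full.drop i → pvBScan full i rest = none := by
  intro rest
  induction rest with
  | nil => intro i _; simp [pvBScan]
  | cons c rest ih =>
    intro i hdrop
    have hfull : full.take i ++ c :: rest = full := by
      conv_rhs => rw [← List.take_append_drop i full]
      rw [← hdrop]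
    have hnext : rest = full.drop (i + 1) := by
      have h1 : full.drop (i + 1) = (full.drop i).drop 1 := by
        rw [List.drop_drop]
      rw [h1, ← hdrop]
      simp
    rw [pvBScan]
    rw [if_neg, ih (i + 1) hnext]
    rintro ⟨rfl, hsome⟩
    have hpre : ∀ p : List Char, full.take i = p → (p ++ [' ']) <+: full := by
      intro p hp
      exact ⟨rest, by rw [← hfull, hp]; simp⟩
    rcases pv_table_some hsome with h | h | h | h | h
    · exact hke (hpre _ h)
    · exact hske (hpre _ h)
    · exact hefk (hpre _ h)
    · exact hbefk (hpre _ h)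
    · exact hbefsk (hpre _ h)

theorem pv_core (n : List Char) :
    String.ofList (pvALoop n [pvKE, pvSKE, pvEFK, pvBEFK, pvBEFSK]) = pvBBody n := by
  by_cases h1 : n = pvKE
  · subst h1; decide
  by_cases h2 : n = pvSKE
  · subst h2; decide
  by_cases h3 : n = pvEFK
  · subst h3; decide
  by_cases h4 : n = pvBEFK
  · subst h4; decide
  by_cases h5 : n = pvBEFSK
  · subst h5; decide
  have hget : pvTable.get? n = none := pv_table_none h1 h2 h3 h4 h5
  by_cases g1 : PySem.Chars.startswith n (pvKE ++ [' ']) = true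
  · obtain ⟨t, ht⟩ := (PySem.Chars.startswith_iff _ _).mp g1
    subst ht
    simp [pvALoop, pvBBody, pvBScan, pvRemoveprefix, pvKE,
      pvTable, PySem.Dict.get?, pv_strip_space_cons,
      PySem.Chars.startswith, List.isPrefixOf]
  by_cases g2 : PySem.Chars.startswith n (pvSKE ++ [' ']) = true
  · obtain ⟨t, ht⟩ := (PySem.Chars.startswith_iff _ _).mp g2
    subst ht
    simp [pvALoop, pvBBody, pvBScan, pvRemoveprefix, pvKE, pvSKE,
      pvTable, PySem.Dict.get?, pv_strip_space_cons,
      PySem.Chars.startswith, List.isPrefixOf]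
  by_cases g3 : PySem.Chars.startswith n (pvEFK ++ [' ']) = true
  · obtain ⟨t, ht⟩ := (PySem.Chars.startswith_iff _ _).mp g3
    subst ht
    simp [pvALoop, pvBBody, pvBScan, pvRemoveprefix, pvKE, pvSKE, pvEFK,
      pvTable, PySem.Dict.get?, pv_strip_space_cons,
      PySem.Chars.startswith, List.isPrefixOf]
  by_cases g4 : PySem.Chars.startswith n (pvBEFK ++ [' ']) = true
  · obtain ⟨t, ht⟩ := (PySem.Chars.startswith_iff _ _).mp g4
    subst ht
    simp [pvALoop, pvBBody, pvBScan, pvRemoveprefix, pvKE, pvSKE, pvEFK, pvBEFK,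
      pvTable, PySem.Dict.get?, pv_strip_space_cons,
      PySem.Chars.startswith, List.isPrefixOf]
  by_cases g5 : PySem.Chars.startswith n (pvBEFSK ++ [' ']) = true
  · obtain ⟨t, ht⟩ := (PySem.Chars.startswith_iff _ _).mp g5
    subst ht
    simp [pvALoop, pvBBody, pvBScan, pvRemoveprefix, pvKE, pvSKE, pvEFK, pvBEFK, pvBEFSK,
      pvTable, PySem.Dict.get?, pv_strip_space_cons,
      PySem.Chars.startswith, List.isPrefixOf]
  -- no pattern matches: both sides are "variant"
  have hscan : pvBScan n 0 n = none := by
    refine pv_scan_none n ?_ ?_ ?_ ?_ ?_ n 0 (by simp)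
    · exact fun hp => g1 ((PySem.Chars.startswith_iff _ _).mpr hp)
    · exact fun hp => g2 ((PySem.Chars.startswith_iff _ _).mpr hp)
    · exact fun hp => g3 ((PySem.Chars.startswith_iff _ _).mpr hp)
    · exact fun hp => g4 ((PySem.Chars.startswith_iff _ _).mpr hp)
    · exact fun hp => g5 ((PySem.Chars.startswith_iff _ _).mpr hp)
  simp [pvALoop, pvBBody, hget, hscan, h1, h2, h3, h4, h5, g1, g2, g3, g4, g5]

-- ===== VERDICT (by name: the statement is the Claim_ definition above) =====
theorem extract_korea_follow_on_modifier_spec : Claim_equal_extract_korea_follow_on_modifier := by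
  intro keyword _
  unfold Spec_extract_korea_follow_on_modifier extract_korea_follow_on_modifier
    extract_korea_follow_on_modifier_alt
  rw [pv_core]
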